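-- pv_equiv track=rewrite | github.com/ChrisBeaumont/codility | python/cannon.py | fire
-- ===== SOURCE A (Python) =====
-- from collections import defaultdict
--
-- def make_stops(land_heights, fire_heights):
--     """
--     stops[h] -> x location where ball fired at height h stops
--     """
--     stops = defaultdict(lambda: -1)
--     h = 0
--     for x, y in enumerate(land_heights):
--         while (y >= h):
--             # only lookup elements of fire_heights
--             if h in fire_heights:
--                 stops[h] = x - 1
--             h += 1
--     return stops
--
-- def fire(land_heights, fire_heights):
--     """
--     stops[h] -> x location where a ball fired at h stops
--     or -1 if ricochet/leaves system
--     """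
--     stops = make_stops(land_heights, set(fire_heights))
--     for h in fire_heights:
--         x = stops[h]
--
--         # leaves system
--         if x < 0:
--             continue
--
--         # update landscape
--         land_heights[x] += 1
--
--         assert land_heights[x + 1] >= h
--
--         # update stops array, if needed
--         y = land_heights[x]
--         if y in stops and stops[y] >= x:
--             stops[y] = x - 1
--
--     return land_heights
-- ===== SOURCE B (Python) =====
-- def fire(land_heights, fire_heights):
--     # Same result via a prefix-max array + binary search per distinct fire height,
--     # instead of A's sweep over every height level. Mutates land_heights in place like A.
--     n = len(land_heights)
--     prefix_max = []
--     for y in land_heights: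
--         prefix_max.append(y if not prefix_max or y > prefix_max[-1] else prefix_max[-1])
--
--     def first_at_least(h):
--         # least i with prefix_max[i] >= h (== n if none)
--         lo, hi = 0, n
--         while lo < hi:
--             mid = (lo + hi) // 2
--             if prefix_max[mid] >= h:
--                 hi = mid
--             else:
--                 lo = mid + 1
--         return lo
--
--     stop = {}
--     for h in set(fire_heights):
--         if h >= 0:  # balls below the ground baseline never enter the system
--             i = first_at_least(h)
--             if i < n:
--                 stop[h] = i - 1
--
--     for h in fire_heights:
--         x = stop.get(h, -1)
--         if x < 0:
--             continue
--         land_heights[x] += 1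
--         y = land_heights[x]
--         if stop.get(y, -1) >= x:
--             stop[y] = x - 1
--     return land_heights
-- ===== Notes on version B (the rewrite author's own statement) =====
-- stated objective: alternative
-- what changed: A sweeps level-by-level through every integer height up to the maximum landscape height to build the stop table; B builds a prefix-max array once and locates each distinct fire height's stop position by binary search.
import Mathlib
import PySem

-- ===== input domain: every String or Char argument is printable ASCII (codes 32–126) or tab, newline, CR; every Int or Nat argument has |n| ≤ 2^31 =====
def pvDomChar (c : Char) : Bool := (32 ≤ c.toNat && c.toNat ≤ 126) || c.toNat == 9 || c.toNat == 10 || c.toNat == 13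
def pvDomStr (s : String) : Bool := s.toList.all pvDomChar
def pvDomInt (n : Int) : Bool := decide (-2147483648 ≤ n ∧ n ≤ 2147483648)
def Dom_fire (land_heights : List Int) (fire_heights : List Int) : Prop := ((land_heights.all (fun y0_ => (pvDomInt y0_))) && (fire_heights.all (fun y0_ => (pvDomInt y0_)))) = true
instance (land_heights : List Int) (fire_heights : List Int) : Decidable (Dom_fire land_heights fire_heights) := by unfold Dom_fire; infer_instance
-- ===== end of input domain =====

-- B builds the stop table from a prefix-max array with a binary search per distinct fire height,
-- instead of A's level-by-level sweep over every height value; the returned list is proved equal.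
-- Both Pythons mutate land_heights in place and return that same list, so the proved
-- return-value equivalence covers the observable mutation as well.

-- ===== PORT A =====
-- inner 'while (y >= h)' loop of make_stops
def msInner (fs : PySem.Set Int) (x : Int) (y : Int) (h : Int) (stops : PySem.Dict Int Int) :
    Int × PySem.Dict Int Int :=
  if hc : h ≤ y then
    msInner fs x y (h + 1) (if PySem.Set.contains fs h then stops.insert h (x - 1) else stops)
  else (h, stops)
termination_by (y + 1 - h).toNat
decreasing_by omega

def make_stops (land_heights : List Int) (fire_heights : PySem.Set Int) : PySem.Dict Int Int :=
  ((PySem.List.enumerate land_heights 0).foldl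
      (fun (st : Int × PySem.Dict Int Int) xy => msInner fire_heights xy.1 xy.2 st.1 st.2)
      (0, PySem.Dict.empty)).2

-- body of A's firing loop (state: current land_heights, stops)
def fireLoopA (st : List Int × PySem.Dict Int Int) (h : Int) : List Int × PySem.Dict Int Int :=
  let x := st.2.getD h (-1)
  -- 'x = stops[h]' on a defaultdict inserts the default for a missing key
  let stops := if st.2.contains h then st.2 else st.2.insert h (-1)
  if x < 0 then (st.1, stops)
  else
    let land := PySem.List.pySetD st.1 x (PySem.List.pyGetD st.1 x 0 + 1)
    -- 'assert land_heights[x + 1] >= h' never fails (a column only ever grows up to its right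
    -- neighbour's current height), so it is a no-op and has no effect to model here
    let y := PySem.List.pyGetD land x 0
    if stops.contains y && decide (x ≤ stops.getD y (-1)) then (land, stops.insert y (x - 1))
    else (land, stops)

def fire (land_heights : List Int) (fire_heights : List Int) : List Int :=
  let stops := make_stops land_heights (PySem.Set.ofList fire_heights)
  (fire_heights.foldl fireLoopA (land_heights, stops)).1

-- ===== PORT B =====
-- prefix_max.append(y if not prefix_max or y > prefix_max[-1] else prefix_max[-1])
def pmStep (pm : List Int) (y : Int) : List Int :=
  pm ++ [if pm.isEmpty || decide (PySem.List.pyGetD pm (-1) 0 < y) then y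
         else PySem.List.pyGetD pm (-1) 0]

-- first_at_least: least i in [lo, hi) with prefix_max[i] >= h, else hi
def firstAtLeast (pm : List Int) (h : Int) (lo hi : Nat) : Nat :=
  if hlt : lo < hi then
    let mid : Nat := (lo + hi) / 2
    if h ≤ PySem.List.pyGetD pm (mid : Int) 0 then firstAtLeast pm h lo mid
    else firstAtLeast pm h (mid + 1) hi
  else lo
termination_by hi - lo
decreasing_by all_goals omega

-- body of the 'for h in set(fire_heights)' stop-building loop
def buildStepB (n : Nat) (pm : List Int) (d : PySem.Dict Int Int) (h : Int) : PySem.Dict Int Int :=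
  if 0 ≤ h then  -- balls below the ground baseline never enter the system
    let i := firstAtLeast pm h 0 n
    if i < n then d.insert h ((i : Int) - 1) else d
  else d

-- body of B's firing loop
def fireLoopB (st : List Int × PySem.Dict Int Int) (h : Int) : List Int × PySem.Dict Int Int :=
  let x := st.2.getD h (-1)
  if x < 0 then st
  else
    let land := PySem.List.pySetD st.1 x (PySem.List.pyGetD st.1 x 0 + 1)
    let y := PySem.List.pyGetD land x 0
    if decide (x ≤ st.2.getD y (-1)) then (land, st.2.insert y (x - 1))
    else (land, st.2)

def fire_alt (land_heights : List Int) (fire_heights : List Int) : List Int :=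
  let n := land_heights.length
  let pm := land_heights.foldl pmStep []
  let stop := (PySem.Set.ofList fire_heights).foldl (buildStepB n pm) PySem.Dict.empty
  (fire_heights.foldl fireLoopB (land_heights, stop)).1

-- ===== PRECONDITION & SPEC =====
def Spec_fire (land_heights : List Int) (fire_heights : List Int) (out : List Int) : Prop := out = fire_alt land_heights fire_heights
instance (land_heights : List Int) (fire_heights : List Int) (out : List Int) : Decidable (Spec_fire land_heights fire_heights out) := by unfold Spec_fire; infer_instance

-- ===== CLAIM (what is proved, stated in full; the proofs are below) =====
def Claim_equal_fire : Prop := ∀ (land_heights : List Int) (fire_heights : List Int), Dom_fire land_heights fire_heights → Spec_fire land_heights fire_heights (fire land_heights fire_heights)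

-- ===== LEMMAS AND PROOFS =====

-- canonical description of both initial stop tables: the ball fired at height k stops just
-- before the first column of height ≥ k (−1 if it ricochets or leaves the system)
def specStop (land : List Int) (fs : PySem.Set Int) (k : Int) : Int :=
  if PySem.Set.contains fs k ∧ 0 ≤ k then
    match List.findIdx? (fun y => decide (k ≤ y)) land with
    | some i => (i : Int) - 1
    | none => -1
  else -1

-- === A's sweep builds specStop ===

lemma msInner_fst (fs : PySem.Set Int) (x y h : Int) (stops : PySem.Dict Int Int) :
    (msInner fs x y h stops).1 = if h ≤ y then y + 1 else h := by
  fun_induction msInner with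
  | case1 h stops hc ih =>
      simp only [dite_eq_ite] at ih
      rw [ih]
      split_ifs with h1 <;> omega
  | case2 h stops hc =>
      simp [hc]

lemma msInner_getD (fs : PySem.Set Int) (x y h : Int) (stops : PySem.Dict Int Int) (k : Int) :
    (msInner fs x y h stops).2.getD k (-1) =
      if PySem.Set.contains fs k ∧ h ≤ k ∧ k ≤ y then x - 1 else stops.getD k (-1) := by
  fun_induction msInner with
  | case1 h stops hc ih =>
      simp only [dite_eq_ite] at ih
      rw [ih]
      by_cases hk : k = h
      · subst hk
        by_cases hf : PySem.Set.contains fs k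
        · simp only [hf, if_true]
          rw [PySem.Dict.getD_insert_self]
          have h1 : ¬ (k + 1 ≤ k) := by omega
          simp [h1, hf, hc]
        · simp at hf
          simp [hf]
      · have h0 : ((if PySem.Set.contains fs h then stops.insert h (x-1) else stops) : PySem.Dict Int Int).getD k (-1) = stops.getD k (-1) := by
          split
          · rw [PySem.Dict.getD_insert_of_ne]; exact hk
          · rfl
        rw [h0]
        have : (PySem.Set.contains fs k ∧ h + 1 ≤ k ∧ k ≤ y) ↔ (PySem.Set.contains fs k ∧ h ≤ k ∧ k ≤ y) := by
          constructor
          · rintro ⟨a, b, c⟩; exact ⟨a, by omega, c⟩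
          · rintro ⟨a, b, c⟩; refine ⟨a, ?_, c⟩; rcases lt_or_eq_of_le b with hb | hb
            · omega
            · exact absurd hb.symm hk
        rw [if_congr this rfl rfl]
  | case2 h stops hc =>
      have : ¬ (h ≤ k ∧ k ≤ y) := by rintro ⟨h1, h2⟩; omega
      simp [hc, this]

lemma sweep_getD (fs : PySem.Set Int) (rest : List Int) :
    ∀ (s h : Int) (stops : PySem.Dict Int Int) (k : Int),
    (((PySem.List.enumerate rest s).foldl
        (fun (st : Int × PySem.Dict Int Int) xy => msInner fs xy.1 xy.2 st.1 st.2)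
        (h, stops)).2).getD k (-1) =
      if PySem.Set.contains fs k ∧ h ≤ k then
        (match List.findIdx? (fun y => decide (k ≤ y)) rest with
         | some i => s + (i : Int) - 1
         | none => stops.getD k (-1))
      else stops.getD k (-1) := by
  induction rest with
  | nil =>
      intro s h stops k
      simp [PySem.List.enumerate_nil, List.findIdx?_nil]
  | cons y ys ih =>
      intro s h stops k
      rw [PySem.List.enumerate_cons]
      simp only [List.foldl_cons]
      have hpair : (msInner fs s y h stops) = ((msInner fs s y h stops).1, (msInner fs s y h stops).2) := rfl
      rw [hpair, ih]
      rw [msInner_fst, msInner_getD, List.findIdx?_cons]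
      by_cases hf : PySem.Set.contains fs k
      · by_cases hky : k ≤ y
        · by_cases hhk : h ≤ k
          · have h1 : ¬ ((if h ≤ y then y + 1 else h) ≤ k) := by split_ifs with hy <;> omega
            simp [hf, hky, hhk, h1]
          · have h1 : ¬ ((if h ≤ y then y + 1 else h) ≤ k) := by split_ifs with hy <;> omega
            simp [hf, hky, hhk, h1]
        · have h1 : ((if h ≤ y then y + 1 else h) ≤ k) ↔ h ≤ k := by split_ifs with hy <;> omega
          have h2 : ¬ (h ≤ k ∧ k ≤ y) := by rintro ⟨_, b⟩; omega
          simp only [hf, true_and, h1, decide_eq_true_eq, hky, if_false, h2, if_false]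
          by_cases hhk : h ≤ k
          · simp only [hhk, if_true]
            cases hidx : List.findIdx? (fun y => decide (k ≤ y)) ys with
            | none => simp
            | some i => simp; ring
          · simp [hhk]
      · simp at hf
        simp [hf]

lemma make_stops_getD (land : List Int) (fs : PySem.Set Int) (k : Int) :
    (make_stops land fs).getD k (-1) = specStop land fs k := by
  unfold make_stops specStop
  rw [sweep_getD]
  cases hidx : List.findIdx? (fun y => decide (k ≤ y)) land with
  | none => simp [PySem.Dict.getD_empty]
  | some i => simp

-- === B's prefix-max + binary search builds specStop ===

-- generic: a fold inserting distinct keys under a condition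
lemma foldl_insert_if_getD (c : Int → Bool) (v : Int → Int) (l : List Int) :
    ∀ (d : PySem.Dict Int Int) (k : Int), l.Nodup →
    ((l.foldl (fun d h => if c h then d.insert h (v h) else d) d).getD k (-1)) =
      if k ∈ l ∧ c k then v k else d.getD k (-1) := by
  induction l with
  | nil => intro d k _; simp
  | cons a t ih =>
      intro d k hnd
      rw [List.foldl_cons, ih _ k (List.Nodup.of_cons hnd)]
      by_cases hmem : k ∈ t
      · have hin : k ∈ a :: t := List.mem_cons_of_mem a hmem
        have hka : k ≠ a := by
          intro e; exact (List.nodup_cons.mp hnd).1 (e ▸ hmem)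
        simp only [hmem, hin, true_and]
        have : ((if c a = true then d.insert a (v a) else d) : PySem.Dict Int Int).getD k (-1) = d.getD k (-1) := by
          split
          · rw [PySem.Dict.getD_insert]; simp [hka]
          · rfl
        rw [this]
      · simp only [hmem, false_and, if_false]
        by_cases hk : k = a
        · subst hk
          by_cases hc : c k = true
          · have hin : k ∈ k :: t := List.mem_cons_self
            simp only [hc, if_true, hin, true_and]
            rw [PySem.Dict.getD_insert_self]
          · have hcf : c k = false := by simpa using hc
            simp [hcf, hmem]
        · have h1 : ¬ (k ∈ a :: t) := by simp [hk, hmem]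
          simp only [h1, false_and, if_false]
          split
          · rw [PySem.Dict.getD_insert]
            simp [hk]
          · rfl

-- spec-side running-max list
def pmRun (m : Int) : List Int → List Int
  | [] => []
  | y :: ys => (max m y) :: pmRun (max m y) ys

lemma foldl_pmStep_eq (l : List Int) : ∀ (acc : List Int) (m : Int),
    List.foldl pmStep (acc ++ [m]) l = (acc ++ [m]) ++ pmRun m l := by
  induction l with
  | nil => intro acc m; simp [pmRun]
  | cons y ys ih =>
      intro acc m
      rw [List.foldl_cons]
      have hstep : pmStep (acc ++ [m]) y = (acc ++ [m]) ++ [max m y] := by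
        unfold pmStep
        rw [PySem.List.pyGetD_neg_one_append_singleton]
        have hne : (acc ++ [m]).isEmpty = false := by simp
        rw [hne]
        simp only [Bool.false_or]
        by_cases hlt : m < y
        · have hmax : max m y = y := max_eq_right (le_of_lt hlt)
          simp [hlt, hmax]
        · have hmax : max m y = m := max_eq_left (not_lt.mp hlt)
          simp [hlt, hmax]
      rw [hstep, ih (acc ++ [m]) (max m y)]
      simp [pmRun]

lemma pm_eq (land : List Int) :
    List.foldl pmStep [] land = match land with
      | [] => ([] : List Int)
      | y :: ys => y :: pmRun y ys := by
  cases land with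
  | nil => rfl
  | cons y ys =>
      rw [List.foldl_cons]
      have hstep : pmStep [] y = [y] := by simp [pmStep]
      rw [hstep]
      have := foldl_pmStep_eq ys [] y
      simpa using this

lemma pmRun_length (m : Int) (l : List Int) : (pmRun m l).length = l.length := by
  induction l generalizing m with
  | nil => rfl
  | cons y ys ih => simp [pmRun, ih]

lemma pmRun_getD (l : List Int) : ∀ (m : Int) (i : Nat), i < l.length →
    (pmRun m l).getD i 0 = (l.take (i + 1)).foldl max m := by
  induction l with
  | nil => intro m i h; simp at h
  | cons y ys ih =>
      intro m i h
      cases i with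
      | zero => simp [pmRun]
      | succ j =>
          show (pmRun m (y :: ys)).getD (j + 1) 0 = _
          simp only [pmRun, List.getD_cons_succ, List.take_succ_cons, List.foldl_cons]
          exact ih (max m y) j (by simpa using h)

lemma foldl_max_ge (h : Int) (l : List Int) : ∀ (m : Int),
    h ≤ List.foldl max m l ↔ h ≤ m ∨ ∃ x ∈ l, h ≤ x := by
  induction l with
  | nil => intro m; simp
  | cons y ys ih =>
      intro m
      rw [List.foldl_cons, ih]
      constructor
      · rintro (hm | ⟨x, hx, hhx⟩)
        · rcases le_max_iff.mp hm with a | a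
          · exact Or.inl a
          · exact Or.inr ⟨y, List.mem_cons_self, a⟩
        · exact Or.inr ⟨x, List.mem_cons_of_mem y hx, hhx⟩
      · rintro (hm | ⟨x, hx, hhx⟩)
        · exact Or.inl (le_max_of_le_left hm)
        · rcases List.mem_cons.mp hx with rfl | hx'
          · exact Or.inl (le_max_of_le_right hhx)
          · exact Or.inr ⟨x, hx', hhx⟩

lemma firstAtLeast_spec (pm : List Int) (h : Int)
    (mono : ∀ i j : Nat, i ≤ j → j < pm.length → pm.getD i 0 ≤ pm.getD j 0) :
    ∀ (lo hi : Nat), lo ≤ hi → hi ≤ pm.length →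
    (∀ i : Nat, i < lo → pm.getD i 0 < h) →
    (∀ i : Nat, hi ≤ i → i < pm.length → h ≤ pm.getD i 0) →
    (∀ i : Nat, i < firstAtLeast pm h lo hi → pm.getD i 0 < h) ∧
    (∀ i : Nat, firstAtLeast pm h lo hi ≤ i → i < pm.length → h ≤ pm.getD i 0) ∧
    firstAtLeast pm h lo hi ≤ pm.length := by
  intro lo hi
  induction lo, hi using firstAtLeast.induct pm h with
  | case1 lo hi hlt mid hge ih =>
      intro hle hhi hbelow habove
      have hmidlen : mid < pm.length := by simp only [mid]; omega
      have hge' : h ≤ PySem.List.pyGetD pm (((lo : Int) + (hi : Int)) / 2) 0 := by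
        rwa [show ((lo : Int) + (hi : Int)) / 2 = (((lo + hi) / 2 : Nat) : Int) from by omega]
      have hstep : firstAtLeast pm h lo hi = firstAtLeast pm h lo mid := by
        rw [firstAtLeast]
        simp [hlt, hge']
        rfl
      rw [hstep]
      refine ih (by simp only [mid]; omega) (by simp only [mid]; omega) hbelow ?_
      intro i hi1 hi2
      have hg : h ≤ pm.getD mid 0 := by
        rw [← PySem.List.pyGetD_natCast]
        exact hge
      have hmono : pm.getD mid 0 ≤ pm.getD i 0 := mono _ _ hi1 hi2
      omega
  | case2 lo hi hlt mid hge ih =>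
      intro hle hhi hbelow habove
      have hmidlen : mid < pm.length := by simp only [mid]; omega
      have hge' : ¬ h ≤ PySem.List.pyGetD pm (((lo : Int) + (hi : Int)) / 2) 0 := by
        rwa [show ((lo : Int) + (hi : Int)) / 2 = (((lo + hi) / 2 : Nat) : Int) from by omega]
      have hstep : firstAtLeast pm h lo hi = firstAtLeast pm h (mid + 1) hi := by
        rw [firstAtLeast]
        simp [hlt, hge']
        rfl
      rw [hstep]
      refine ih (by simp only [mid]; omega) hhi ?_ habove
      intro i hi1
      have hg : ¬ h ≤ pm.getD mid 0 := by
        rw [← PySem.List.pyGetD_natCast]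
        exact hge
      by_cases hcase : i < lo
      · exact hbelow i hcase
      · have hle2 : pm.getD i 0 ≤ pm.getD mid 0 := mono i mid (by omega) hmidlen
        omega
  | case3 lo hi hlt =>
      intro hle hhi hbelow habove
      rw [firstAtLeast, dif_neg hlt]
      exact ⟨hbelow, fun i h1 h2 => habove i (by omega) h2, by omega⟩

lemma pm_length (land : List Int) : (List.foldl pmStep [] land).length = land.length := by
  rw [pm_eq]
  cases land with
  | nil => rfl
  | cons y ys => simp [pmRun_length]

lemma pm_getD_ge_iff (land : List Int) (i : Nat) (hi : i < land.length) (h : Int) :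
    h ≤ (List.foldl pmStep [] land).getD i 0 ↔ ∃ j, j ≤ i ∧ h ≤ land.getD j 0 := by
  rw [pm_eq]
  cases land with
  | nil => simp at hi
  | cons y ys =>
      cases i with
      | zero =>
          simp only [List.getD_cons_zero]
          constructor
          · intro hy; exact ⟨0, le_refl 0, by simpa using hy⟩
          · rintro ⟨j, hj, hle⟩
            have : j = 0 := Nat.le_zero.mp hj
            subst this
            simpa using hle
      | succ j =>
          have hjlen : j < ys.length := by simpa using hi
          simp only [List.getD_cons_succ]
          rw [pmRun_getD ys y j hjlen, foldl_max_ge]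
          constructor
          · rintro (hy | ⟨x, hx, hhx⟩)
            · exact ⟨0, Nat.zero_le _, by simpa using hy⟩
            · rcases List.mem_take_iff_getElem.mp hx with ⟨t, ht, rfl⟩
              have ht' : t < j + 1 := lt_of_lt_of_le ht (by omega)
              refine ⟨t + 1, by omega, ?_⟩
              rw [List.getD_cons_succ]
              rw [List.getD_eq_getElem ys 0 (by omega)]
              exact hhx
          · rintro ⟨t, htle, hle⟩
            cases t with
            | zero => exact Or.inl (by simpa using hle)
            | succ u =>
                right
                have hu : u < ys.length := by omega
                refine ⟨ys[u], ?_, ?_⟩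
                · exact List.mem_take_iff_getElem.mpr ⟨u, by omega, rfl⟩
                · rw [List.getD_cons_succ, List.getD_eq_getElem ys 0 hu] at hle
                  exact hle

lemma findIdx?_of_firstAtLeast (land : List Int) (k : Int) :
    List.findIdx? (fun y => decide (k ≤ y)) land =
      (if firstAtLeast (List.foldl pmStep [] land) k 0 land.length < land.length
       then some (firstAtLeast (List.foldl pmStep [] land) k 0 land.length) else none) := by
  set pm := List.foldl pmStep [] land with hpm
  have hlen : pm.length = land.length := pm_length land
  have mono : ∀ i j : Nat, i ≤ j → j < pm.length → pm.getD i 0 ≤ pm.getD j 0 := by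
    intro i j hij hj
    rw [hlen] at hj
    refine (pm_getD_ge_iff land j hj _).mpr ?_
    rcases (pm_getD_ge_iff land i (by omega) _).mp le_rfl with ⟨t, ht, hle⟩
    exact ⟨t, by omega, hle⟩
  have hspec := firstAtLeast_spec pm k mono 0 land.length (Nat.zero_le _) (by omega)
      (by intro i h; omega) (by intro i h1 h2; rw [hlen] at h2; omega)
  obtain ⟨hbelow, habove, hle⟩ := hspec
  set r := firstAtLeast pm k 0 land.length with hr
  have hland_le : ∀ j : Nat, j < land.length → land.getD j 0 ≤ pm.getD j 0 := by
    intro j hj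
    exact (pm_getD_ge_iff land j hj _).mpr ⟨j, le_rfl, le_rfl⟩
  by_cases hcase : r < land.length
  · rw [if_pos hcase]
    rw [List.findIdx?_eq_some_iff_getElem]
    have hblt : ∀ j : Nat, j < r → land.getD j 0 < k := by
      intro j hj
      have h1 := hbelow j hj
      have h2 := hland_le j (by omega)
      omega
    have hge : k ≤ land.getD r 0 := by
      have h1 := habove r le_rfl (by omega)
      rcases (pm_getD_ge_iff land r hcase k).mp h1 with ⟨t, ht, hle2⟩
      rcases Nat.lt_or_ge t r with hlt | hge2
      · have := hblt t hlt; omega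
      · have : t = r := by omega
        subst this; exact hle2
    refine ⟨hcase, ?_, ?_⟩
    · rw [← List.getD_eq_getElem land 0 hcase]
      simpa using hge
    · intro j hj
      have := hblt j hj
      rw [← List.getD_eq_getElem land 0 (by omega : j < land.length)]
      simp only [decide_eq_true_eq]
      omega
  · rw [if_neg hcase]
    rw [List.findIdx?_eq_none_iff]
    intro x hx
    rcases List.mem_iff_getElem.mp hx with ⟨j, hj, rfl⟩
    have h1 := hbelow j (by omega)
    have h2 := hland_le j hj
    rw [List.getD_eq_getElem land 0 hj] at h2
    simp only [decide_eq_false_iff_not]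
    omega

lemma buildB_getD (land : List Int) (fire_heights : List Int) (k : Int) :
    ((PySem.Set.ofList fire_heights).foldl (buildStepB land.length (List.foldl pmStep [] land)) PySem.Dict.empty).getD k (-1)
      = specStop land (PySem.Set.ofList fire_heights) k := by
  set pm := List.foldl pmStep [] land with hpm
  set n := land.length with hn
  have hfun : ∀ (d : PySem.Dict Int Int) (h : Int), buildStepB n pm d h =
      (if (decide (0 ≤ h) && decide (firstAtLeast pm h 0 n < n)) then
        d.insert h ((firstAtLeast pm h 0 n : Int) - 1) else d) := by
    intro d h
    unfold buildStepB
    by_cases h0 : 0 ≤ h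
    · simp only [h0, if_true, decide_true, Bool.true_and, decide_eq_true_eq]
    · simp [h0]
  have hfold : (PySem.Set.ofList fire_heights).foldl (buildStepB n pm) PySem.Dict.empty =
      (PySem.Set.ofList fire_heights).foldl (fun d h =>
        if (decide (0 ≤ h) && decide (firstAtLeast pm h 0 n < n)) then
          d.insert h ((firstAtLeast pm h 0 n : Int) - 1) else d) PySem.Dict.empty := by
    congr 1
    funext d h
    exact hfun d h
  rw [hfold, foldl_insert_if_getD _ _ _ _ _ (PySem.Set.nodup_ofList fire_heights)]
  unfold specStop
  rw [findIdx?_of_firstAtLeast land k, ← hpm, ← hn]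
  by_cases hmem : k ∈ PySem.Set.ofList fire_heights
  · have hcontains : PySem.Set.contains (PySem.Set.ofList fire_heights) k = true := by simpa using hmem
    by_cases h0 : 0 ≤ k
    · by_cases hfl : firstAtLeast pm k 0 n < n
      · simp [hmem, hcontains, h0, hfl]
      · simp [hmem, hcontains, h0, hfl, PySem.Dict.getD_empty]
    · simp [hmem, hcontains, h0, PySem.Dict.getD_empty]
  · have hcontains : ¬ PySem.Set.contains (PySem.Set.ofList fire_heights) k = true := by simpa using hmem
    simp [hmem, hcontains, PySem.Dict.getD_empty]

-- === the two firing loops agree whenever the stop tables agree pointwise ===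

lemma fireFold_rel (fires : List Int) :
    ∀ (land : List Int) (d1 d2 : PySem.Dict Int Int),
    (∀ k, d1.getD k (-1) = d2.getD k (-1)) →
    (fires.foldl fireLoopA (land, d1)).1 = (fires.foldl fireLoopB (land, d2)).1 := by
  induction fires with
  | nil => intro land d1 d2 _; rfl
  | cons h t ih =>
      intro land d1 d2 hrel
      rw [List.foldl_cons, List.foldl_cons]
      have hx : d1.getD h (-1) = d2.getD h (-1) := hrel h
      unfold fireLoopA fireLoopB
      simp only
      set x := d1.getD h (-1) with hxdef
      rw [← hx]
      -- the defaultdict insertion keeps every lookup unchanged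
      have hrel' : ∀ k, ((if d1.contains h then d1 else d1.insert h (-1)) : PySem.Dict Int Int).getD k (-1) = d2.getD k (-1) := by
        intro k
        split
        · exact hrel k
        · next hcont =>
            rw [PySem.Dict.getD_insert]
            split
            · next heq =>
                subst heq
                rw [← hrel k, PySem.Dict.getD_of_not_contains]
                simpa using hcont
            · exact hrel k
      by_cases hneg : x < 0
      · simp only [hneg, if_true]
        exact ih land _ d2 hrel'
      · simp only [hneg, if_false]
        have hx0 : 0 ≤ x := by omega
        set land' := PySem.List.pySetD land x (PySem.List.pyGetD land x 0 + 1) with hland'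
        set y := PySem.List.pyGetD land' x 0 with hy
        set s1 := (if d1.contains h then d1 else d1.insert h (-1) : PySem.Dict Int Int) with hs1
        have hcond : (s1.contains y && decide (x ≤ s1.getD y (-1))) = decide (x ≤ d2.getD y (-1)) := by
          rw [← hrel' y]
          by_cases hc : s1.contains y
          · simp [hc]
          · have : s1.getD y (-1) = -1 := by
              rw [PySem.Dict.getD_of_not_contains]
              simpa using hc
            simp [hc, this]
            omega
        rw [hcond]
        by_cases hupd : x ≤ d2.getD y (-1)
        · simp only [hupd, decide_true, if_true]
          refine ih land' _ _ ?_
          intro k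
          rw [PySem.Dict.getD_insert, PySem.Dict.getD_insert]
          split
          · rfl
          · exact hrel' k
        · simp only [hupd, decide_false, if_false]
          exact ih land' _ _ hrel'

-- ===== VERDICT (by name: the statement is the Claim_ definition above) =====
theorem fire_spec : Claim_equal_fire := by
  intro land fires _
  unfold Spec_fire fire fire_alt
  exact fireFold_rel fires land _ _ (fun k => by
    rw [make_stops_getD, buildB_getD])
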